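-- pv_equiv track=rewrite | github.com/JoguMamatha/JoguMamatha | Edabit conditions easy.py | parity_analysis
-- ===== SOURCE A (Python) =====
-- def parity_analysis(n):
--     m=n;s=0
--     if n/10<0:
--         return True
--     else:
--         while n>=1:
--             a=n%10
--             s+=a
--             n//=10
--         return (m%2==s%2)
-- ===== SOURCE B (Python) =====
-- def parity_analysis(n):
--     if n < 0:  # same guard as A's n/10 < 0 (true for exactly the negative ints)
--         return True
--     s = sum(int(d) for d in str(n))
--     return n % 2 == s % 2
-- ===== Notes on version B (the rewrite author's own statement) =====
-- stated objective: idiomatic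
-- what changed: replaces the arithmetic remainder/quotient digit-peeling while-loop by summing the digits of str(n), a different data representation of the digits
import Mathlib
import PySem

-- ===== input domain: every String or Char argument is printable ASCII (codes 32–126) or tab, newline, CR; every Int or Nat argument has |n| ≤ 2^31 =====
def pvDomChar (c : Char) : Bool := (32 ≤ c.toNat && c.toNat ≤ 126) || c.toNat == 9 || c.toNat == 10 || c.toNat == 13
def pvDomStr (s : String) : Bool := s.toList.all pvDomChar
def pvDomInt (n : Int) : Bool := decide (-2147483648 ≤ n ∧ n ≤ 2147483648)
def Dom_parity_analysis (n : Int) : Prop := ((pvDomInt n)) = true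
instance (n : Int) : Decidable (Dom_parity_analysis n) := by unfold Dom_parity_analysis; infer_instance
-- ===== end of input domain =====

-- B replaces A's arithmetic digit-peeling loop by summing the digit characters of str(n) (idiomatic, same cost).


-- ===== PORT A =====
-- A's while-loop peeling off the last digit each step (same state (n, s))
def paLoop (n s : Int) : Int :=
  if n ≥ 1 then paLoop (PySem.Int.floordiv n 10) (s + PySem.Int.mod n 10) else s
termination_by n.toNat
decreasing_by
  rename_i h
  rw [PySem.Int.floordiv_eq_ediv_of_pos (by omega : (0:Int) < 10)]
  omega

def parity_analysis (n : Int) : Bool :=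
  let m := n
  -- Python tests n/10 < 0 with float division; for an int n that holds exactly when n < 0
  if n < 0 then true
  else decide (PySem.Int.mod m 2 = PySem.Int.mod (paLoop n 0) 2)

-- ===== PORT B =====
def parity_analysis_alt (n : Int) : Bool :=
  if n < 0 then true
  else
    -- sum(int(d) for d in str(n)); int(d) for a single digit char d is d.toNat - 48 (exact there)
    let s : Int := (PySem.Int.toStr n).toList.foldl (fun acc c => acc + ((c.toNat : Int) - 48)) 0
    decide (PySem.Int.mod n 2 = PySem.Int.mod s 2)

-- ===== PRECONDITION & SPEC =====
def Spec_parity_analysis (n : Int) (out : Bool) : Prop := out = parity_analysis_alt n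
instance (n : Int) (out : Bool) : Decidable (Spec_parity_analysis n out) := by unfold Spec_parity_analysis; infer_instance

-- ===== CLAIM (what is proved, stated in full; the proofs are below) =====
def Claim_equal_parity_analysis : Prop := ∀ (n : Int), Dom_parity_analysis n → Spec_parity_analysis n (parity_analysis n)

-- ===== LEMMAS AND PROOFS =====

-- decimal digit sum of a natural number
def digSum (n : Nat) : Nat :=
  if n = 0 then 0 else n % 10 + digSum (n / 10)
decreasing_by exact Nat.div_lt_self (by omega) (by omega)

theorem digSum_zero : digSum 0 = 0 := by rw [digSum]; rfl

theorem digSum_pos (n : Nat) (hn : n ≠ 0) : digSum n = n % 10 + digSum (n / 10) := by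
  rw [digSum, if_neg hn]

theorem paLoop_eq_digSum (k : Nat) : ∀ (n s : Int), n.toNat = k → paLoop n s = s + (digSum n.toNat : Int) := by
  induction k using Nat.strong_induction_on with
  | _ k ih =>
    intro n s hk
    rw [paLoop]
    by_cases h : n ≥ 1
    · simp only [h, if_true]
      rw [PySem.Int.floordiv_eq_ediv_of_pos (by omega : (0:Int) < 10),
          PySem.Int.mod_eq_emod_of_pos (by omega : (0:Int) < 10)]
      have hlt : (n / 10).toNat < k := by omega
      rw [ih _ hlt (n / 10) _ rfl]
      have h1 : digSum n.toNat = n.toNat % 10 + digSum (n.toNat / 10) := by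
        rw [digSum]; simp [show n.toNat ≠ 0 by omega]
      have h2 : (n / 10).toNat = n.toNat / 10 := by omega
      have h3 : n % 10 = ((n.toNat % 10 : Nat) : Int) := by omega
      rw [h1, h2, h3]; push_cast; ring
    · simp only [h, if_false]
      have : n.toNat = 0 := by omega
      rw [this, digSum]; simp

theorem foldl_add_map (f : Char → Int) : ∀ (cs : List Char) (s : Int),
    cs.foldl (fun acc c => acc + f c) s = s + (cs.map f).sum := by
  intro cs
  induction cs with
  | nil => simp
  | cons c cs ih => intro s; simp [List.foldl, ih]; ring

theorem digitChar_val (d : Nat) (hd : d < 10) : ((Nat.digitChar d).toNat : Int) - 48 = (d : Int) := by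
  interval_cases d <;> decide

theorem toDigitsCore_sum (fuel : Nat) : ∀ (n : Nat) (ds : List Char), n < fuel →
    ((Nat.toDigitsCore 10 fuel n ds).map (fun c => ((c.toNat : Int) - 48))).sum
      = (digSum n : Int) + ((ds.map (fun c => ((c.toNat : Int) - 48))).sum) := by
  induction fuel with
  | zero => intro n ds h; omega
  | succ fuel ih =>
    intro n ds _
    rw [Nat.toDigitsCore]
    have hlt : n % 10 < 10 := by omega
    by_cases h10 : n / 10 = 0
    · simp only [h10, if_true]
      by_cases hn : n = 0
      · subst hn; simp [digSum_zero, digitChar_val 0 (by omega)]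
      · rw [digSum_pos n hn, h10, digSum_zero]
        simp [digitChar_val _ hlt]
    · simp only [h10, if_false]
      have hfuel : n / 10 < fuel := by
        have h1 : n / 10 < n := Nat.div_lt_self (by omega) (by omega)
        omega
      rw [ih _ _ hfuel, digSum_pos n (by omega)]
      simp [digitChar_val _ hlt]
      ring

theorem strSum_eq_digSum (n : Int) (hn : 0 ≤ n) :
    (PySem.Int.toStr n).toList.foldl (fun acc c => acc + ((c.toNat : Int) - 48)) 0
      = (digSum n.toNat : Int) := by
  rw [foldl_add_map, PySem.Int.toList_toStr]
  unfold PySem.Int.toChars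
  simp only [show ¬ n < 0 by omega, if_false]
  unfold Nat.toDigits
  rw [toDigitsCore_sum (n.toNat + 1) n.toNat [] (by omega)]
  simp

-- ===== VERDICT (by name: the statement is the Claim_ definition above) =====
theorem parity_analysis_spec : Claim_equal_parity_analysis := by
  intro n _
  unfold Spec_parity_analysis parity_analysis parity_analysis_alt
  by_cases h : n < 0
  · simp [h]
  · simp only [h, if_false]
    rw [paLoop_eq_digSum n.toNat n 0 rfl, strSum_eq_digSum n (by omega)]
    simp
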